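-- pv_equiv track=rewrite | github.com/OlofHarrysson/Indexing-and-Document-Retrieval | hw2.py | create_bool_rep
-- ===== SOURCE A (Python) =====
-- def create_bool_rep(documents, query):
--     bool_rep = []
--     for doc in documents:
--         query_vec = []
--         for q in query:
--             if q in doc:
--                 query_vec.append(1)
--             else:
--                 query_vec.append(0)
--         bool_rep.append(query_vec)
--
--     return bool_rep
-- ===== SOURCE B (Python) =====
-- def create_bool_rep(documents, query):
--     # Build once: each distinct query term -> list of its column positions.
--     positions = {}
--     for j, q in enumerate(query):
--         positions.setdefault(q, []).append(j)
--     bool_rep = []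
--     for doc in documents:
--         row = [0] * len(query)
--         for e in doc:
--             for j in positions.get(e, []):
--                 row[j] = 1
--         bool_rep.append(row)
--     return bool_rep
-- ===== Notes on version B (the rewrite author's own statement) =====
-- stated objective: faster
-- what changed: B replaces A's per-cell list-membership test (scanning each doc for every query term) by a term->columns dict built once from the query plus a zero-init/scatter pass over each document's elements.
import Mathlib
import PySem

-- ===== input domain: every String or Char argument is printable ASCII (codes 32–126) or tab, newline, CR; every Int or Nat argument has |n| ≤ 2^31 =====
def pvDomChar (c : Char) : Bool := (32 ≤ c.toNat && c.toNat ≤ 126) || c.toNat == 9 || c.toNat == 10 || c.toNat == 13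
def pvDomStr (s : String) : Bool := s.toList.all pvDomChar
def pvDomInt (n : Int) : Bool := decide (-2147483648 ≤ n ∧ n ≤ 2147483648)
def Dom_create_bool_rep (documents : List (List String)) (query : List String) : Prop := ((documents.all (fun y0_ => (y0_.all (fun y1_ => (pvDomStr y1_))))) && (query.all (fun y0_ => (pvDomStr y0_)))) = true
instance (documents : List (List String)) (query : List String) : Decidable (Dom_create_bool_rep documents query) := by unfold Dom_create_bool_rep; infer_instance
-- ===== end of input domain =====

-- B replaces A's per-cell membership test by a query-term→columns dict and a zero-init/scatter pass (asymptotically faster: no per-cell doc scan).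

-- ===== PORT A =====
def create_bool_rep (documents : List (List String)) (query : List String) : List (List Int) :=
  documents.foldl (fun bool_rep doc =>
    bool_rep ++ [query.foldl (fun query_vec q =>
      query_vec ++ [if doc.contains q then (1 : Int) else 0]) []]) []

-- ===== PORT B =====
-- positions = {}; for j, q in enumerate(query): positions.setdefault(q, []).append(j)
def pvPositions (query : List String) : PySem.Dict String (List Int) :=
  (PySem.List.enumerate query).foldl
    (fun d p => d.modify p.2 [] (fun v => v ++ [p.1])) PySem.Dict.empty

def create_bool_rep_alt (documents : List (List String)) (query : List String) : List (List Int) :=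
  let positions := pvPositions query
  documents.foldl (fun bool_rep doc =>
    bool_rep ++ [doc.foldl (fun row e =>
      ((positions.getD e []).foldl (fun r j => PySem.List.pySetD r j 1) row))
      (List.replicate query.length 0)]) []

-- ===== PRECONDITION & SPEC =====
def Spec_create_bool_rep (documents : List (List String)) (query : List String) (out : List (List Int)) : Prop := out = create_bool_rep_alt documents query
instance (documents : List (List String)) (query : List String) (out : List (List Int)) : Decidable (Spec_create_bool_rep documents query out) := by unfold Spec_create_bool_rep; infer_instance

-- ===== CLAIM (what is proved, stated in full; the proofs are below) =====
def Claim_equal_create_bool_rep : Prop := ∀ (documents : List (List String)) (query : List String), Dom_create_bool_rep documents query → Spec_create_bool_rep documents query (create_bool_rep documents query)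

-- ===== LEMMAS AND PROOFS =====

-- the positions fold groups: getD q = old value ++ the indices paired with q
theorem pv_posfold_getD (l : List (Int × String)) (d : PySem.Dict String (List Int)) (q : String) :
    (l.foldl (fun d p => d.modify p.2 [] (fun v => v ++ [p.1])) d).getD q []
      = d.getD q [] ++ (l.filter (fun p => p.2 == q)).map (·.1) := by
  induction l generalizing d with
  | nil => simp
  | cons p l ih =>
    simp only [List.foldl_cons, ih, List.filter_cons]
    by_cases h : p.2 = q
    · simp [h]
    · simp [h, PySem.Dict.getD_modify, Ne.symm h]

theorem pv_mem_positions (query : List String) (q : String) (j : Int) :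
    j ∈ (pvPositions query).getD q []
      ↔ ∃ k : Nat, ∃ h : k < query.length, j = (k : Int) ∧ query[k] = q := by
  unfold pvPositions
  rw [pv_posfold_getD]
  simp only [PySem.Dict.getD_empty, List.nil_append, List.mem_map, List.mem_filter]
  constructor
  · rintro ⟨p, ⟨hp, hq⟩, rfl⟩
    rcases (PySem.List.mem_enumerate_iff query 0 p).1 hp with ⟨k, hk, rfl⟩
    exact ⟨k, hk, by simp, by simpa using (beq_iff_eq.1 hq)⟩
  · rintro ⟨k, hk, rfl, hq⟩
    exact ⟨((k : Int), query[k]),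
      ⟨(PySem.List.mem_enumerate_iff query 0 _).2 ⟨k, hk, by simp⟩, by simp [hq]⟩, rfl⟩

-- the scatter through a list of in-range indices: length kept, cell k becomes 1 iff k is in the list
theorem pv_scatter_length (L : List Int) (row : List Int) :
    (L.foldl (fun r j => PySem.List.pySetD r j 1) row).length = row.length := by
  induction L generalizing row with
  | nil => rfl
  | cons j L ih => simp [ih, PySem.List.length_pySetD]

theorem pv_scatter_getElem? (L : List Int) (row : List Int) (k : Nat)
    (hL : ∀ j ∈ L, 0 ≤ j) :
    (L.foldl (fun r j => PySem.List.pySetD r j 1) row)[k]?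
      = if (k : Int) ∈ L then (if k < row.length then some 1 else none) else row[k]? := by
  induction L generalizing row with
  | nil => simp
  | cons j L ih =>
    have hj : 0 ≤ j := hL j (by simp)
    have hrest : ∀ i ∈ L, 0 ≤ i := fun i hi => hL i (by simp [hi])
    rw [List.foldl_cons, ih _ hrest, PySem.List.pySetD_of_nonneg (h := hj)]
    by_cases hmem : (k : Int) ∈ L
    · simp [hmem]
    · by_cases hkj : (k : Int) = j
      · have hjk : j.toNat = k := by omega
        simp [hkj, hjk, List.getElem?_set]
      · have hjk : ¬ (j.toNat = k) := by omega
        simp [hmem, hkj, hjk]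

-- one document step: length kept, cell k becomes 1 iff query[k] = e, else unchanged
theorem pv_doc_length (query : List String) (doc : List String) (row : List Int) :
    (doc.foldl (fun row e =>
        (((pvPositions query).getD e []).foldl (fun r j => PySem.List.pySetD r j 1) row)) row).length
      = row.length := by
  induction doc generalizing row with
  | nil => rfl
  | cons e doc ih => simp [ih, pv_scatter_length]

theorem pv_pos_nonneg (query : List String) (e : String) :
    ∀ j ∈ (pvPositions query).getD e [], 0 ≤ j := by
  intro j hj
  rcases (pv_mem_positions query e j).1 hj with ⟨k, _, rfl, _⟩
  exact Int.natCast_nonneg k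

theorem pv_doc_getElem? (query : List String) (doc : List String) (row : List Int)
    (hlen : row.length = query.length) (k : Nat) (hk : k < query.length) :
    (doc.foldl (fun row e =>
        (((pvPositions query).getD e []).foldl (fun r j => PySem.List.pySetD r j 1) row)) row)[k]?
      = if query[k] ∈ doc then some 1 else row[k]? := by
  induction doc generalizing row with
  | nil => simp
  | cons e doc ih =>
    have hlen' : (((pvPositions query).getD e []).foldl (fun r j => PySem.List.pySetD r j 1) row).length = query.length := by
      rw [pv_scatter_length]; exact hlen
    simp only [List.foldl_cons, ih _ hlen', List.mem_cons]
    rw [pv_scatter_getElem? _ _ _ (pv_pos_nonneg query e)]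
    by_cases hmem : query[k] ∈ doc
    · simp [hmem]
    · by_cases heq : query[k] = e
      · have : (k : Int) ∈ (pvPositions query).getD e [] :=
          (pv_mem_positions query e k).2 ⟨k, hk, rfl, heq⟩
        simp [heq, this, hlen, hk]
      · have hnot : (k : Int) ∉ (pvPositions query).getD e [] := by
          intro h
          rcases (pv_mem_positions query e (k : Int)).1 h with ⟨k', _, hkk, hq⟩
          have : k' = k := by omega
          exact heq (this ▸ hq)
        simp [hmem, heq, hnot]

theorem pv_row_eq (query : List String) (doc : List String) :
    query.foldl (fun query_vec q => query_vec ++ [if doc.contains q then (1 : Int) else 0]) []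
      = doc.foldl (fun row e =>
          (((pvPositions query).getD e []).foldl (fun r j => PySem.List.pySetD r j 1) row))
          (List.replicate query.length 0) := by
  rw [PySem.List.foldl_append_singleton_eq_map, List.nil_append]
  have hlenB : (doc.foldl (fun row e =>
      (((pvPositions query).getD e []).foldl (fun r j => PySem.List.pySetD r j 1) row))
      (List.replicate query.length (0 : Int))).length = query.length :=
    (pv_doc_length query doc (List.replicate query.length (0 : Int))).trans (by simp)
  apply List.ext_getElem?
  intro k
  by_cases hk : k < query.length
  · rw [pv_doc_getElem? query doc _ (by simp) k hk]
    by_cases hmem : query[k] ∈ doc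
    · simp [hmem, hk]
    · simp [hmem, hk]
  · have h1 : (query.map (fun q => if doc.contains q then (1 : Int) else 0))[k]? = none := by
      simp; omega
    have h2 : (doc.foldl (fun row e =>
        (((pvPositions query).getD e []).foldl (fun r j => PySem.List.pySetD r j 1) row))
        (List.replicate query.length (0 : Int)))[k]? = none :=
      List.getElem?_eq_none (by rw [hlenB]; omega)
    rw [h1, h2]

-- ===== VERDICT (by name: the statement is the Claim_ definition above) =====
theorem create_bool_rep_spec : Claim_equal_create_bool_rep := by
  intro documents query _
  unfold Spec_create_bool_rep create_bool_rep create_bool_rep_alt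
  rw [PySem.List.foldl_append_singleton_eq_map, PySem.List.foldl_append_singleton_eq_map]
  simp only [List.nil_append]
  exact List.map_congr_left (fun doc _ => pv_row_eq query doc)
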